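-- pv_equiv track=rewrite | github.com/hsiavelis21/CS-130 | modules/CellContents.py | find_type
-- ===== SOURCE A (Python) =====
-- def find_type(contents=''):
--     if contents == '':
--         return 'EMPTY'
--
--     if contents[0] == "'":
--         return 'STRING'
--
--     if contents[0] == '=':
--         return 'FORMULA'
--
--     if contents[0] == '#':
--         return 'ERROR'
--
--     else:
--         dot_count = 0
--
--         for char in contents:
--             if char == '.':
--                 dot_count += 1
--
--             if dot_count > 1 or (char != '.' and not char.isnumeric()):
--                 return 'STRING'
--
--         return 'LITERAL'
-- ===== SOURCE B (Python) =====
-- def find_type(contents=''):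
--     if contents == '':
--         return 'EMPTY'
--     first = contents[0]
--     if first == "'":
--         return 'STRING'
--     if first == '=':
--         return 'FORMULA'
--     if first == '#':
--         return 'ERROR'
--     parts = contents.split('.')
--     if len(parts) <= 2 and all(c.isnumeric() for p in parts for c in p):
--         return 'LITERAL'
--     return 'STRING'
-- ===== Notes on version B (the rewrite author's own statement) =====
-- stated objective: alternative
-- what changed: Replaces the char-by-char scan with a running dot counter by a split-on-the-dot-separator-then-validate pass: at most two parts and every character of every part numeric.
import Mathlib
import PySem

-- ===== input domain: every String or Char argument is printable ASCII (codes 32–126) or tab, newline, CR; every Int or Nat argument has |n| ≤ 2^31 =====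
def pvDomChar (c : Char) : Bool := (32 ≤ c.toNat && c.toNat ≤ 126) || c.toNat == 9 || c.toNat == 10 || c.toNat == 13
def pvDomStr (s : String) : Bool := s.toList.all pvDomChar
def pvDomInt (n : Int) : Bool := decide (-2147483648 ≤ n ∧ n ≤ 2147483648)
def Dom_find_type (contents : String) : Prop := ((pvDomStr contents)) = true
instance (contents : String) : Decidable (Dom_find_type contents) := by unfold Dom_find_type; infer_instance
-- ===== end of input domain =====

-- B replaces A's char-by-char scan with a running dot counter by splitting on the dot separator and validating the parts (alternative decomposition, same cost).
-- On the ASCII domain Python's char.isnumeric() is exactly PySem.Chars.isdigit.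

-- ===== PORT A =====
-- the for-loop over the characters with the running dot counter
def findTypeLoopA : List Char → Nat → String
  | [], _ => "LITERAL"
  | c :: rest, dot_count =>
    let dot_count := if c = '.' then dot_count + 1 else dot_count
    if dot_count > 1 ∨ (c ≠ '.' ∧ ¬ (PySem.Chars.isdigit c = true)) then "STRING"
    else findTypeLoopA rest dot_count

def find_type (contents : String) : String :=
  match contents.toList with
  | [] => "EMPTY"
  | c :: _ =>
    if c = '\'' then "STRING"
    else if c = '=' then "FORMULA"
    else if c = '#' then "ERROR"
    else findTypeLoopA contents.toList 0

-- ===== PORT B =====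
-- contents.split('.') with a single-character separator is exactly List.splitOn '.' on the code points
def find_type_alt (contents : String) : String :=
  match contents.toList with
  | [] => "EMPTY"
  | c :: _ =>
    if c = '\'' then "STRING"
    else if c = '=' then "FORMULA"
    else if c = '#' then "ERROR"
    else
      let parts := contents.toList.splitOn '.'
      if parts.length ≤ 2 ∧ parts.all (fun p => p.all PySem.Chars.isdigit) then "LITERAL"
      else "STRING"

-- ===== PRECONDITION & SPEC =====
def Spec_find_type (contents : String) (out : String) : Prop := out = find_type_alt contents
instance (contents : String) (out : String) : Decidable (Spec_find_type contents out) := by unfold Spec_find_type; infer_instance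

-- ===== CLAIM (what is proved, stated in full; the proofs are below) =====
def Claim_equal_find_type : Prop := ∀ (contents : String), Dom_find_type contents → Spec_find_type contents (find_type contents)

-- ===== LEMMAS AND PROOFS =====

theorem loopA_eq_split (cs : List Char) (d : Nat) (hd : d ≤ 1) :
    findTypeLoopA cs d =
      if (cs.splitOn '.').length + d ≤ 2 ∧ (cs.splitOn '.').all (fun p => p.all PySem.Chars.isdigit) then "LITERAL" else "STRING" := by
  induction cs generalizing d with
  | nil =>
    simp [findTypeLoopA, List.splitOn, List.splitOnP_nil]
    omega
  | cons c rest ih =>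
    by_cases hc : c = '.'
    · subst hc
      rcases Nat.le_one_iff_eq_zero_or_eq_one.mp hd with h0 | h1
      · subst h0
        have hstep : findTypeLoopA ('.' :: rest) 0 = findTypeLoopA rest 1 := by
          simp [findTypeLoopA]
        rw [hstep, ih 1 (le_refl 1)]
        simp only [List.splitOn, List.splitOnP_cons, beq_self_eq_true, if_true, List.length_cons,
          List.all_cons, List.all_nil, Bool.true_and]
        congr 1
      · subst h1
        have hstep : findTypeLoopA ('.' :: rest) 1 = "STRING" := by
          simp [findTypeLoopA]
        rw [hstep]
        have hlen : 0 < (rest.splitOnP (· == '.')).length :=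
          List.length_pos_iff.mpr (List.splitOnP_ne_nil _ _)
        rw [if_neg]
        rintro ⟨h1, -⟩
        simp only [List.splitOn, List.splitOnP_cons, beq_self_eq_true, if_true,
          List.length_cons] at h1
        omega
    · have hsp : (c :: rest).splitOn '.' = (rest.splitOn '.').modifyHead (List.cons c) := by
        simp [List.splitOn, List.splitOnP_cons, hc]
      obtain ⟨h, t, hht⟩ : ∃ h t, rest.splitOn '.' = h :: t := by
        rcases e : rest.splitOn '.' with _ | ⟨h, t⟩
        · exact absurd e (List.splitOnP_ne_nil _ _)
        · exact ⟨h, t, rfl⟩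
      by_cases hdig : PySem.Chars.isdigit c = true
      · have hstep : findTypeLoopA (c :: rest) d = findTypeLoopA rest d := by
          simp [findTypeLoopA, hc, hdig]
          omega
        rw [hstep, ih d hd, hsp, hht]
        simp only [List.modifyHead, List.length_cons, List.all_cons, hdig, Bool.true_and]
        rfl
      · have hstep : findTypeLoopA (c :: rest) d = "STRING" := by
          simp [findTypeLoopA, hc, hdig]
        rw [hstep, hsp, hht]
        rw [if_neg]
        rintro ⟨-, h2⟩
        simp [List.modifyHead, hdig] at h2


-- ===== VERDICT (by name: the statement is the Claim_ definition above) =====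
theorem find_type_spec : Claim_equal_find_type := by
  intro contents _
  unfold Spec_find_type find_type find_type_alt
  rcases e : contents.toList with _ | ⟨c, rest⟩
  · rfl
  · simp only
    split_ifs with h1 h2 h3 h4 <;> try rfl
    all_goals rw [loopA_eq_split _ 0 (by omega)]
    · simp only [Nat.add_zero, if_pos h4]
    · simp only [Nat.add_zero, if_neg h4]
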